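-- pv_equiv track=rewrite | github.com/patrickgaskill/mtg | card_utils.py | generalize_mana_cost
-- ===== SOURCE A (Python) =====
-- def generalize_mana_cost(mana_cost: str) -> str:
--     """
--     Generalizes a mana cost string by replacing color symbols with generic symbols.
--
--     Args:
--         mana_cost (str): A string representing a mana cost.
--
--     Returns:
--         str: A generalized mana cost string.
--
--     Examples:
--         >>> generalize_mana_cost("{2}")
--         '{2}'
--         >>> generalize_mana_cost("{W}{W}")
--         '{M}{M}'
--         >>> generalize_mana_cost("{W}{U}{R}")
--         '{M}{N}{O}'
--         >>> generalize_mana_cost("{W}{U}{B}{R}{G}")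
--         '{W}{U}{B}{R}{G}'
--         >>> generalize_mana_cost("{2/W}{2/U}")
--         '{2/M}{2/N}'
--         >>> generalize_mana_cost("{W/P}{W/U}{2/W}")
--         '{M/P}{M/N}{2/M}'
--     """
--     colors = "WUBRG"
--     generics = "MNOP"
--     color_map = {}
--
--     for c in mana_cost:
--         if c in colors and c not in color_map:
--             if len(color_map) < len(generics):
--                 color_map[c] = generics[len(color_map)]
--             else:
--                 return mana_cost
--
--     return "".join(color_map.get(c, c) for c in mana_cost)
-- ===== SOURCE B (Python) =====
-- def generalize_mana_cost(mana_cost: str) -> str: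
--     # Different algorithm: instead of scanning the string and growing a map,
--     # compute each color's first-occurrence index with str.find, sort the
--     # present colors by that index, and assign generics by rank.
--     pairs = [(mana_cost.find(c), c) for c in "WUBRG" if c in mana_cost]
--     present = sorted(pairs, key=lambda p: p[0])
--     if len(present) > 4:
--         return mana_cost
--     table = {}
--     for (_, c), g in zip(present, "MNOP"):
--         table[c] = g
--     return "".join(table.get(ch, ch) for ch in mana_cost)
-- ===== Notes on version B (the rewrite author's own statement) =====
-- stated objective: alternative
-- what changed: Replaces A's incremental scan that grows a first-appearance color map with an index-based algorithm: compute each color's first-occurrence index via str.find, sort the present colors by that index to recover the appearance order, assign generics by rank, then substitute.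
import Mathlib
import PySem

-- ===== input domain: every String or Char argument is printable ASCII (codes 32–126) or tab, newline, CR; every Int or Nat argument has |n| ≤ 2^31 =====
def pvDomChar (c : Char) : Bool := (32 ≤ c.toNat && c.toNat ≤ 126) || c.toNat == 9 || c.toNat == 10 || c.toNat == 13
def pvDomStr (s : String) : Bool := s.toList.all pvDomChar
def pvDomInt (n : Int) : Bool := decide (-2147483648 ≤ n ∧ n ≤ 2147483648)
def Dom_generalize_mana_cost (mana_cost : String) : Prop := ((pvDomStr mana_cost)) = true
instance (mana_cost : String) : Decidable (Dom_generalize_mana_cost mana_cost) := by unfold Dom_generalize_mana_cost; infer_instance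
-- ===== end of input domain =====

-- B replaces A's incremental scan-and-grow color map with an index-based algorithm:
-- each color's first-occurrence index via str.find, sort present colors by that index,
-- assign generics by rank, then substitute (objective: alternative, same cost).

-- ===== PORT A =====
-- A's for-loop with its early `return mana_cost`: `none` means that early return fired.
-- `generics[len(color_map)]` is guarded by `len(color_map) < 4`, so the index is in
-- range and `getD _ ' '` is exact there.
def gmcA_loop : List Char → PySem.Dict Char Char → Option (PySem.Dict Char Char)
  | [], m => some m
  | c :: rest, m =>
    if ("WUBRG".toList.contains c) && !(m.contains c) then
      if m.size < 4 then
        gmcA_loop rest (m.insert c ("MNOP".toList.getD m.size ' '))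
      else
        none
    else
      gmcA_loop rest m

def generalize_mana_cost (mana_cost : String) : String :=
  match gmcA_loop mana_cost.toList PySem.Dict.empty with
  | none => mana_cost
  | some m => String.mk (mana_cost.toList.map (fun c => m.getD c c))

-- ===== PORT B =====
-- pairs = [(mana_cost.find(c), c) for c in "WUBRG" if c in mana_cost]
-- present = sorted(pairs, key=lambda p: p[0]); overflow check; table from zip; substitute.
def generalize_mana_cost_alt (mana_cost : String) : String :=
  let pairs := ("WUBRG".toList.filter
      (fun c => PySem.Str.isIn (String.mk [c]) mana_cost)).map
      (fun c => (PySem.Str.find mana_cost (String.mk [c]), c))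
  let present := PySem.List.sorted pairs (fun p => p.1) false
  if present.length > 4 then mana_cost
  else
    let table := (present.zip "MNOP".toList).foldl
        (fun d pg => d.insert pg.1.2 pg.2) PySem.Dict.empty
    String.mk (mana_cost.toList.map (fun ch => table.getD ch ch))

-- ===== PRECONDITION & SPEC =====
def Spec_generalize_mana_cost (mana_cost : String) (out : String) : Prop := out = generalize_mana_cost_alt mana_cost
instance (mana_cost : String) (out : String) : Decidable (Spec_generalize_mana_cost mana_cost out) := by unfold Spec_generalize_mana_cost; infer_instance

-- ===== CLAIM (what is proved, stated in full; the proofs are below) =====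
def Claim_equal_generalize_mana_cost : Prop := ∀ (mana_cost : String), Dom_generalize_mana_cost mana_cost → Spec_generalize_mana_cost mana_cost (generalize_mana_cost mana_cost)

-- ===== LEMMAS AND PROOFS =====

-- The distinct colors of `l` in order of first appearance, continuing a seen-list `ks`.
def gmcExtend : List Char → List Char → List Char
  | [], ks => ks
  | c :: l, ks =>
    if ("WUBRG".toList.contains c) && !(ks.contains c) then gmcExtend l (ks ++ [c])
    else gmcExtend l ks

-- The dict assigning generics to a seen-list in order.
def gmcDictOf (ks : List Char) : PySem.Dict Char Char :=
  (ks.zip "MNOP".toList).foldl (fun d p => d.insert p.1 p.2) PySem.Dict.empty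

theorem gmcExtend_length_le (l ks : List Char) : ks.length ≤ (gmcExtend l ks).length := by
  induction l generalizing ks with
  | nil => simp [gmcExtend]
  | cons c l ih =>
    simp only [gmcExtend]
    split
    · exact le_trans (by simp) (ih (ks ++ [c]))
    · exact ih ks

theorem gmcExtend_mem (l ks : List Char) (x : Char) :
    x ∈ gmcExtend l ks ↔ x ∈ ks ∨ ("WUBRG".toList.contains x ∧ x ∈ l) := by
  induction l generalizing ks with
  | nil => simp [gmcExtend]
  | cons c l ih =>
    simp only [gmcExtend]
    split
    · rename_i h
      simp only [Bool.and_eq_true, Bool.not_eq_true', List.contains_eq_mem,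
        decide_eq_true_eq, decide_eq_false_iff_not] at h
      rw [ih]
      simp only [List.mem_append, List.mem_cons,
        List.contains_eq_mem, decide_eq_true_eq]
      constructor
      · intro hx
        rcases hx with hx | ⟨hc, hm⟩
        · rcases hx with hx | hx
          · exact Or.inl hx
          · rcases hx with rfl | hx
            · exact Or.inr ⟨h.1, Or.inl rfl⟩
            · exact absurd hx (by simp)
        · exact Or.inr ⟨hc, Or.inr hm⟩
      · intro hx
        rcases hx with hx | ⟨hc, hm⟩
        · exact Or.inl (Or.inl hx)
        · rcases hm with rfl | hm
          · exact Or.inl (Or.inr (Or.inl rfl))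
          · exact Or.inr ⟨hc, hm⟩
    · rename_i h
      simp only [Bool.and_eq_true, Bool.not_eq_true', List.contains_eq_mem,
        decide_eq_true_eq, decide_eq_false_iff_not, not_and, not_not] at h
      rw [ih]
      simp only [List.mem_cons, List.contains_eq_mem, decide_eq_true_eq]
      constructor
      · intro hx
        rcases hx with hx | ⟨hc, hm⟩
        · exact Or.inl hx
        · exact Or.inr ⟨hc, Or.inr hm⟩
      · intro hx
        rcases hx with hx | ⟨hc, hm⟩
        · exact Or.inl hx
        · rcases hm with rfl | hm
          · exact Or.inl (h hc)
          · exact Or.inr ⟨hc, hm⟩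

theorem gmcExtend_nodup (l ks : List Char) (h : ks.Nodup) : (gmcExtend l ks).Nodup := by
  induction l generalizing ks with
  | nil => simpa [gmcExtend]
  | cons c l ih =>
    simp only [gmcExtend]
    split
    · rename_i hc
      refine ih _ ?_
      simp only [Bool.and_eq_true, Bool.not_eq_true', List.contains_eq_mem,
        decide_eq_false_iff_not] at hc
      rw [List.nodup_append]
      refine ⟨h, List.nodup_singleton c, ?_⟩
      intro a ha b hb
      simp only [List.mem_singleton] at hb
      subst hb
      intro heq
      exact hc.2 (heq ▸ ha)
    · exact ih _ h

-- [c] <+: xs iff xs starts with c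
theorem gmc_singleton_prefix (c : Char) (xs : List Char) :
    [c] <+: xs ↔ xs.head? = some c := by
  cases xs with
  | nil => simp
  | cons x t =>
    simp only [List.head?_cons, Option.some.injEq]
    constructor
    · rintro ⟨r, hr⟩
      simp only [List.singleton_append, List.cons.injEq] at hr
      exact hr.1.symm
    · rintro rfl
      exact ⟨t, rfl⟩

theorem gmc_singleton_prefix_drop (c : Char) (l : List Char) (i : Nat) :
    [c] <+: l.drop i ↔ l[i]? = some c := by
  rw [gmc_singleton_prefix, List.head?_drop]

-- a ∈ pre → find (pre ++ rest) [a] is a nonneg index < pre.length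
theorem gmc_find_lt_of_mem_left (a : Char) (pre rest : List Char) (h : a ∈ pre) :
    0 ≤ PySem.Chars.find (pre ++ rest) [a] ∧
    PySem.Chars.find (pre ++ rest) [a] < pre.length := by
  obtain ⟨i, hi, hget⟩ := List.mem_iff_getElem.mp h
  have hocc : (pre ++ rest)[i]? = some a := by
    rw [List.getElem?_append_left (by omega), List.getElem?_eq_getElem hi, hget]
  have hpre : [a] <+: (pre ++ rest).drop i := (gmc_singleton_prefix_drop a _ i).mpr hocc
  have hinf : [a] <:+: (pre ++ rest) := by
    rw [← PySem.Chars.isIn_iff_infix, ← PySem.Chars.exists_prefix_drop_iff_isIn]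
    exact ⟨i, hpre⟩
  have hnn : 0 ≤ PySem.Chars.find (pre ++ rest) [a] :=
    (PySem.Chars.find_nonneg_iff _ _).mpr hinf
  refine ⟨hnn, ?_⟩
  have hspec := PySem.Chars.find_spec hnn
  have hle : (PySem.Chars.find (pre ++ rest) [a]).toNat ≤ i := by
    by_contra hgt
    exact hspec.2 i (by omega) hpre
  omega

-- c ∉ pre → pre.length ≤ find (pre ++ c :: rest) [c]
theorem gmc_find_ge_of_not_mem (c : Char) (pre rest : List Char) (h : c ∉ pre) :
    (pre.length : Int) ≤ PySem.Chars.find (pre ++ c :: rest) [c] := by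
  have hocc : (pre ++ c :: rest)[pre.length]? = some c := by
    rw [List.getElem?_append_right (le_refl _)]
    simp
  have hpre : [c] <+: (pre ++ c :: rest).drop pre.length :=
    (gmc_singleton_prefix_drop c _ pre.length).mpr hocc
  have hinf : [c] <:+: (pre ++ c :: rest) := by
    rw [← PySem.Chars.isIn_iff_infix, ← PySem.Chars.exists_prefix_drop_iff_isIn]
    exact ⟨pre.length, hpre⟩
  have hnn : 0 ≤ PySem.Chars.find (pre ++ c :: rest) [c] :=
    (PySem.Chars.find_nonneg_iff _ _).mpr hinf
  have hspec := PySem.Chars.find_spec hnn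
  have hge : pre.length ≤ (PySem.Chars.find (pre ++ c :: rest) [c]).toNat := by
    by_contra hlt
    have hpd := hspec.1
    rw [gmc_singleton_prefix_drop] at hpd
    rw [List.getElem?_append_left (by omega)] at hpd
    exact h (List.mem_of_getElem? hpd)
  omega

-- First-occurrence ordering: the extend list is strictly increasing in find-index.
theorem gmcExtend_pairwise (l pre ks : List Char)
    (h1 : ∀ x ∈ ks, x ∈ pre)
    (h2 : ∀ x ∈ pre, "WUBRG".toList.contains x → x ∈ ks)
    (h3 : ks.Pairwise (fun a b => PySem.Chars.find (pre ++ l) [a] < PySem.Chars.find (pre ++ l) [b])) :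
    (gmcExtend l ks).Pairwise
      (fun a b => PySem.Chars.find (pre ++ l) [a] < PySem.Chars.find (pre ++ l) [b]) := by
  induction l generalizing pre ks with
  | nil => simpa using h3
  | cons c l ih =>
    simp only [gmcExtend]
    split
    · rename_i hc
      simp only [Bool.and_eq_true, Bool.not_eq_true', List.contains_eq_mem,
        decide_eq_true_eq, decide_eq_false_iff_not] at hc
      have hcpre : c ∉ pre := fun hmem =>
        hc.2 (h2 c hmem (by simpa [List.contains_eq_mem] using hc.1))
      rw [List.append_cons pre c l]
      refine ih (pre ++ [c]) (ks ++ [c]) ?_ ?_ ?_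
      · intro x hx
        rcases List.mem_append.mp hx with hx | hx
        · exact List.mem_append.mpr (Or.inl (h1 x hx))
        · exact List.mem_append.mpr (Or.inr hx)
      · intro x hx hcol
        rcases List.mem_append.mp hx with hx | hx
        · exact List.mem_append.mpr (Or.inl (h2 x hx hcol))
        · exact List.mem_append.mpr (Or.inr hx)
      · rw [List.pairwise_append]
        refine ⟨?_, List.pairwise_singleton _ _, ?_⟩
        · rw [← List.append_cons pre c l]
          exact h3
        · intro a ha b hb
          simp only [List.mem_singleton] at hb
          rw [hb, ← List.append_cons pre c l]
          have hfa := gmc_find_lt_of_mem_left a pre (c :: l) (h1 a ha)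
          have hfc := gmc_find_ge_of_not_mem c pre l hcpre
          omega
    · rename_i hc
      simp only [Bool.and_eq_true, Bool.not_eq_true', List.contains_eq_mem,
        decide_eq_true_eq, decide_eq_false_iff_not, not_and, not_not] at hc
      rw [List.append_cons pre c l]
      refine ih (pre ++ [c]) ks ?_ ?_ ?_
      · intro x hx
        exact List.mem_append.mpr (Or.inl (h1 x hx))
      · intro x hx hcol
        rcases List.mem_append.mp hx with hx | hx
        · exact h2 x hx hcol
        · simp only [List.mem_singleton] at hx
          subst hx
          exact hc (by simpa [List.contains_eq_mem] using hcol)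
      · rw [← List.append_cons pre c l]
        exact h3

-- dict facts about gmcDictOf
theorem gmcDictOf_items (ks : List Char) (h : ks.Nodup) (h4 : ks.length ≤ 4) :
    (gmcDictOf ks).items = ks.zip "MNOP".toList := by
  unfold gmcDictOf
  have hfresh : ∀ p ∈ ks.zip "MNOP".toList, (PySem.Dict.empty : PySem.Dict Char Char).contains p.1 = false := by
    intro p _
    exact PySem.Dict.contains_empty p.1
  have hnd : ((ks.zip "MNOP".toList).map Prod.fst).Nodup := by
    rw [List.map_fst_zip (by simpa using h4)]
    exact h
  rw [PySem.Dict.items_foldl_insert_fresh (ks.zip "MNOP".toList) Prod.fst Prod.snd PySem.Dict.empty hfresh hnd]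
  show ([] : List (Char × Char)) ++ _ = _
  simp

theorem gmcDictOf_keys (ks : List Char) (h : ks.Nodup) (h4 : ks.length ≤ 4) :
    (gmcDictOf ks).keys = ks := by
  show (gmcDictOf ks).items.map Prod.fst = ks
  rw [gmcDictOf_items ks h h4]
  exact List.map_fst_zip (by simpa using h4)

theorem gmcDictOf_contains (ks : List Char) (h : ks.Nodup) (h4 : ks.length ≤ 4) (c : Char) :
    (gmcDictOf ks).contains c = ks.contains c := by
  rw [PySem.Dict.contains_eq_decide_mem_keys, gmcDictOf_keys ks h h4, List.contains_eq_mem]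

theorem gmcDictOf_size (ks : List Char) (h : ks.Nodup) (h4 : ks.length ≤ 4) :
    (gmcDictOf ks).size = ks.length := by
  show (gmcDictOf ks).items.length = ks.length
  rw [gmcDictOf_items ks h h4]
  simp only [List.length_zip]
  have : "MNOP".toList.length = 4 := by decide
  omega

theorem gmc_zip_append (ks : List Char) (c : Char) (g : List Char) (h : ks.length < g.length) :
    (ks ++ [c]).zip g = ks.zip g ++ [(c, g.getD ks.length ' ')] := by
  induction ks generalizing g with
  | nil =>
    cases g with
    | nil => simp at h
    | cons x t => simp [List.getD]
  | cons k ks ih =>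
    cases g with
    | nil => simp at h
    | cons x t =>
      simp only [List.cons_append, List.zip_cons_cons, List.length_cons, List.getD]
      rw [ih t (by simpa using h)]
      simp [List.getD]

theorem gmcDictOf_insert (ks : List Char) (c : Char) (h : ks.Nodup) (hlt : ks.length < 4)
    (hc : c ∉ ks) :
    (gmcDictOf ks).insert c ("MNOP".toList.getD ks.length ' ') = gmcDictOf (ks ++ [c]) := by
  apply PySem.Dict.ext
  have hncont : (gmcDictOf ks).contains c = false := by
    rw [gmcDictOf_contains ks h (by omega) c]
    simpa [List.contains_eq_mem] using hc
  rw [PySem.Dict.items_insert_of_not_contains _ _ hncont,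
    gmcDictOf_items ks h (by omega),
    gmcDictOf_items (ks ++ [c]) (by
      rw [List.nodup_append]
      refine ⟨h, List.nodup_singleton c, ?_⟩
      intro a ha b hb
      simp only [List.mem_singleton] at hb
      subst hb
      intro heq
      exact hc (heq ▸ ha)) (by simp; omega),
    gmc_zip_append ks c "MNOP".toList (by simpa using hlt)]

-- A's loop computed against the spec list
theorem gmcA_loop_spec (l ks : List Char) (h : ks.Nodup) (h4 : ks.length ≤ 4) :
    gmcA_loop l (gmcDictOf ks) =
      if (gmcExtend l ks).length ≤ 4 then some (gmcDictOf (gmcExtend l ks)) else none := by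
  induction l generalizing ks with
  | nil => simp [gmcA_loop, gmcExtend, h4]
  | cons c l ih =>
    simp only [gmcA_loop, gmcExtend, gmcDictOf_contains ks h h4 c]
    split
    · rename_i hcond
      rw [gmcDictOf_size ks h h4]
      by_cases hlt : ks.length < 4
      · rw [if_pos hlt, gmcDictOf_insert ks c h hlt (by
          simp only [Bool.and_eq_true, Bool.not_eq_true', List.contains_eq_mem,
            decide_eq_false_iff_not] at hcond
          exact hcond.2)]
        exact ih (ks ++ [c]) (by
          rw [List.nodup_append]
          refine ⟨h, List.nodup_singleton c, ?_⟩
          intro a ha b hb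
          simp only [List.mem_singleton] at hb
          subst hb
          intro heq
          simp only [Bool.and_eq_true, Bool.not_eq_true', List.contains_eq_mem,
            decide_eq_false_iff_not] at hcond
          exact hcond.2 (heq ▸ ha)) (by simp only [List.length_append, List.length_singleton]; omega)
      · rw [if_neg hlt]
        have h6 : ¬ ((gmcExtend l (ks ++ [c])).length ≤ 4) := by
          have h5 := gmcExtend_length_le l (ks ++ [c])
          simp only [List.length_append, List.length_singleton] at h5
          omega
        rw [if_neg h6]
    · exact ih ks h h4

-- ===== VERDICT (by name: the statement is the Claim_ definition above) =====
theorem generalize_mana_cost_spec : Claim_equal_generalize_mana_cost := by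
  intro s _
  unfold Spec_generalize_mana_cost generalize_mana_cost generalize_mana_cost_alt
  have h0 : gmcDictOf [] = (PySem.Dict.empty : PySem.Dict Char Char) := rfl
  have hA : gmcA_loop s.toList PySem.Dict.empty =
      if (gmcExtend s.toList []).length ≤ 4 then some (gmcDictOf (gmcExtend s.toList [])) else none := by
    rw [← h0]
    exact gmcA_loop_spec s.toList [] List.nodup_nil (by simp)
  have hmk : ∀ c : Char, (String.mk [c]).toList = [c] := fun c =>
    Eq.symm ((fun {l} {s} => String.ofList_eq.mp) rfl)
  have hfind : ∀ c : Char, PySem.Str.find s (String.mk [c]) = PySem.Chars.find s.toList [c] := by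
    intro c
    rw [PySem.Str.find_eq, hmk c]
  have hpairs : ("WUBRG".toList.filter
        (fun c => PySem.Str.isIn (String.mk [c]) s)).map
        (fun c => (PySem.Str.find s (String.mk [c]), c)) =
      ("WUBRG".toList.filter (fun c => PySem.Str.isIn (String.mk [c]) s)).map
        (fun c => (PySem.Chars.find s.toList [c], c)) := by
    refine List.map_congr_left ?_
    intro c _
    rw [hfind c]
  have hperm : (gmcExtend s.toList []).Perm
      ("WUBRG".toList.filter (fun c => PySem.Str.isIn (String.mk [c]) s)) := by
    rw [List.perm_ext_iff_of_nodup (gmcExtend_nodup s.toList [] List.nodup_nil)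
      (List.Nodup.filter _ (by decide))]
    intro x
    rw [gmcExtend_mem, List.mem_filter]
    have hb : PySem.Str.isIn (String.mk [x]) s = true ↔ x ∈ s.toList := by
      rw [PySem.Str.isIn_iff_infix, hmk x]
      exact List.singleton_infix_iff x s.toList
    simp only [List.contains_eq_mem, decide_eq_true_eq, List.not_mem_nil, false_or]
    rw [hb]
  have hpw : ((gmcExtend s.toList []).map
      (fun c => (PySem.Chars.find s.toList [c], c))).Pairwise
      (fun p q : Int × Char => p.1 < q.1) := by
    rw [List.pairwise_map]
    have := gmcExtend_pairwise s.toList [] [] (by simp) (by simp) List.Pairwise.nil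
    rw [List.nil_append] at this
    exact this
  have hsorted : PySem.List.sorted
      (("WUBRG".toList.filter (fun c => PySem.Str.isIn (String.mk [c]) s)).map
        (fun c => (PySem.Str.find s (String.mk [c]), c)))
      (fun p => p.1) false =
      (gmcExtend s.toList []).map (fun c => (PySem.Chars.find s.toList [c], c)) := by
    rw [hpairs]
    exact PySem.List.sorted_eq_of_perm_of_pairwise_lt _ _ _
      (List.Perm.map _ hperm) hpw
  simp only [hsorted, hA, List.length_map]
  by_cases hle : (gmcExtend s.toList []).length ≤ 4
  · rw [if_pos hle, if_neg (by omega)]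
    have htable : (((gmcExtend s.toList []).map
          (fun c => (PySem.Chars.find s.toList [c], c))).zip "MNOP".toList).foldl
        (fun d pg => d.insert pg.1.2 pg.2) PySem.Dict.empty = gmcDictOf (gmcExtend s.toList []) := by
      rw [List.zip_map_left, List.foldl_map]
      rfl
    rw [htable]
  · rw [if_neg hle, if_pos (by omega)]
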